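-- pv_equiv track=rewrite | github.com/kevinchurch101-jpg/Golf-analysis- | output/briefing.py | build_briefing_from_claude_response
-- ===== SOURCE A (Python) =====
-- def build_briefing_from_claude_response(raw_response: str) -> str:
--     """
--     Extract briefing paragraph from Claude API response.
--     Returns clean briefing text ready for HTML.
--     """
--     if not raw_response:
--         return ""
--
--     lines = raw_response.split("\n")
--     in_briefing = False
--     briefing_lines = []
--
--     for line in lines:
--         stripped = line.strip()
--         upper = stripped.upper()
--
--         # Start capturing after briefing header
--         if any(k in upper for k in ["BRIEFING PARAGRAPH", "WEEKLY BRIEFING", "## BRIEFING", "1. BRIEFING"]):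
--             in_briefing = True
--             continue
--
--         # Stop at next major section
--         if in_briefing and stripped and any(
--             upper.startswith(k) for k in [
--                 "2.", "3.", "##", "INITIAL PLAYER", "RANKING", "FRL TARGET",
--                 "POOL SECTION", "FLAG", "TIER", "OVERALL RANK", "VALUE RANK"
--             ]
--         ):
--             break
--
--         if in_briefing and stripped:
--             briefing_lines.append(stripped)
--
--     result = "\n\n".join(
--         p for p in " ".join(briefing_lines).split("  ") if p.strip()
--     )
--
--     # Fallback: if extraction failed, return first 1000 chars
--     if not result and raw_response:
--         result = raw_response[:1000].strip()
--
--     return result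
-- ===== SOURCE B (Python) =====
-- HEADER_KEYWORDS = ["BRIEFING PARAGRAPH", "WEEKLY BRIEFING", "## BRIEFING", "1. BRIEFING"]
-- STOP_KEYWORDS = ["2.", "3.", "##", "INITIAL PLAYER", "RANKING", "FRL TARGET",
--                  "POOL SECTION", "FLAG", "TIER", "OVERALL RANK", "VALUE RANK"]
--
--
-- def build_briefing_from_claude_response(raw_response: str) -> str:
--     """
--     Extract briefing paragraph from Claude API response.
--     Backward pass (right fold) with two continuation accumulators:
--     b = briefing lines for the suffix if capture is already on,
--     n = briefing lines for the suffix if capture is not yet on.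
--     """
--     if not raw_response:
--         return ""
--
--     b, n = [], []
--     for line in reversed(raw_response.split("\n")):
--         s = line.strip()
--         u = s.upper()
--         if any(k in u for k in HEADER_KEYWORDS):
--             n = b                       # header turns capture on for the rest
--         elif s and any(u.startswith(k) for k in STOP_KEYWORDS):
--             b = []                      # a stop line ends an active capture
--         elif s:
--             b = [s] + b                 # text line is kept if capture is on
--
--     result = "\n\n".join(p for p in " ".join(n).split("  ") if p.strip())
--
--     if not result:
--         result = raw_response[:1000].strip()
--
--     return result
-- ===== Notes on version B (the rewrite author's own statement) =====
-- stated objective: alternative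
-- what changed: Replaces A's forward flag-driven loop with early break by a single backward pass (right fold) carrying two continuation accumulators (briefing-of-suffix with capture on / capture off), so there is no mutable flag, no break and no header search; normalization is unchanged.
import Mathlib
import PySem

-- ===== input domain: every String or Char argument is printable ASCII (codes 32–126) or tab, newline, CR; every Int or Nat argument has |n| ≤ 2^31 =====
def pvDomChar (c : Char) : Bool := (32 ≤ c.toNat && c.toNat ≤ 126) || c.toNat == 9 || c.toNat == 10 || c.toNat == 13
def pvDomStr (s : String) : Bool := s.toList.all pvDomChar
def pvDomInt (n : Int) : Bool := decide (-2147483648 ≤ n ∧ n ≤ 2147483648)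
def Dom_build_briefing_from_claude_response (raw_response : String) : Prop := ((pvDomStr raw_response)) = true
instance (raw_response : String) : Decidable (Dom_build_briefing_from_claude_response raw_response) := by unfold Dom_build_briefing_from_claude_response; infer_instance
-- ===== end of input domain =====

-- B replaces A's forward flag loop (mutable in_briefing, early break) by a single backward
-- pass (right fold) with two continuation accumulators; objective: alternative, same cost.

-- shared keyword lists (identical literals in both Pythons)
def pvHeaders : List String := ["BRIEFING PARAGRAPH", "WEEKLY BRIEFING", "## BRIEFING", "1. BRIEFING"]
def pvStops : List String :=
  ["2.", "3.", "##", "INITIAL PLAYER", "RANKING", "FRL TARGET",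
   "POOL SECTION", "FLAG", "TIER", "OVERALL RANK", "VALUE RANK"]

-- normalization step, textually identical in A and B:
-- "\n\n".join(p for p in " ".join(briefing_lines).split("  ") if p.strip())
def pvNormalize (briefing_lines : List String) : String :=
  PySem.Str.join "\n\n"
    (((PySem.Str.split? (PySem.Str.join " " briefing_lines) "  ").getD []).filter
      (fun p => PySem.Str.strip p != ""))

-- ===== PORT A =====
-- A's for-loop with the mutable in_briefing flag and early break
def pvLoopA : List String → Bool → List String → List String
  | [], _, acc => acc
  | line :: rest, in_briefing, acc =>
    let stripped := PySem.Str.strip line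
    let upper := PySem.Str.upper stripped
    if pvHeaders.any (fun k => PySem.Str.isIn k upper) then
      pvLoopA rest true acc
    else if in_briefing && stripped != "" &&
        pvStops.any (fun k => PySem.Str.startswith upper k) then
      acc  -- break
    else if in_briefing && stripped != "" then
      pvLoopA rest in_briefing (acc ++ [stripped])
    else
      pvLoopA rest in_briefing acc

def build_briefing_from_claude_response (raw_response : String) : String :=
  if raw_response == "" then "" else
  let lines := (PySem.Str.split? raw_response "\n").getD []  -- sep "\n" ≠ "", never none
  let briefing_lines := pvLoopA lines false []
  let result := pvNormalize briefing_lines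
  if result == "" then PySem.Str.strip (PySem.Str.slice raw_response none (some 1000))
  else result

-- ===== PORT B =====
-- one backward step: st = (b, n) = (briefing of the suffix with capture on, with capture off)
def pvStepB (line : String) (st : List String × List String) : List String × List String :=
  let s := PySem.Str.strip line
  let u := PySem.Str.upper s
  if pvHeaders.any (fun k => PySem.Str.isIn k u) then (st.1, st.1)
  else if s != "" && pvStops.any (fun k => PySem.Str.startswith u k) then ([], st.2)
  else if s != "" then (s :: st.1, st.2)
  else st

def build_briefing_from_claude_response_alt (raw_response : String) : String :=
  if raw_response == "" then "" else
  let lines := (PySem.Str.split? raw_response "\n").getD []  -- sep "\n" ≠ "", never none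
  -- Python's loop over reversed(lines) with accumulator pair = right fold over lines
  let briefing_lines := (lines.foldr pvStepB ([], [])).2
  let result := pvNormalize briefing_lines
  if result == "" then PySem.Str.strip (PySem.Str.slice raw_response none (some 1000))
  else result

-- ===== PRECONDITION & SPEC =====
def Spec_build_briefing_from_claude_response (raw_response : String) (out : String) : Prop := out = build_briefing_from_claude_response_alt raw_response
instance (raw_response : String) (out : String) : Decidable (Spec_build_briefing_from_claude_response raw_response out) := by unfold Spec_build_briefing_from_claude_response; infer_instance

-- ===== CLAIM (what is proved, stated in full; the proofs are below) =====
def Claim_equal_build_briefing_from_claude_response : Prop := ∀ (raw_response : String), Dom_build_briefing_from_claude_response raw_response → Spec_build_briefing_from_claude_response raw_response (build_briefing_from_claude_response raw_response)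

-- ===== LEMMAS AND PROOFS =====

theorem pvLoopA_cons (l : String) (rest acc : List String) (fl : Bool) :
    pvLoopA (l :: rest) fl acc =
      if pvHeaders.any (fun k => PySem.Str.isIn k (PySem.Str.upper (PySem.Str.strip l))) then
        pvLoopA rest true acc
      else if fl && PySem.Str.strip l != "" &&
          pvStops.any (fun k => PySem.Str.startswith (PySem.Str.upper (PySem.Str.strip l)) k) then
        acc
      else if fl && PySem.Str.strip l != "" then
        pvLoopA rest fl (acc ++ [PySem.Str.strip l])
      else
        pvLoopA rest fl acc := rfl

-- A's loop, with either flag value, computes the corresponding component of B's fold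
theorem pvLoopA_eq_foldr (lines : List String) : ∀ acc,
    pvLoopA lines true acc = acc ++ (lines.foldr pvStepB ([], [])).1 ∧
    pvLoopA lines false acc = acc ++ (lines.foldr pvStepB ([], [])).2 := by
  induction lines with
  | nil => intro acc; simp [pvLoopA]
  | cons l rest ih =>
    intro acc
    have ihT := fun acc => (ih acc).1
    have ihF := fun acc => (ih acc).2
    rw [List.foldr_cons]
    by_cases hh : pvHeaders.any (fun k => PySem.Str.isIn k (PySem.Str.upper (PySem.Str.strip l))) = true
    · constructor <;>
        · rw [pvLoopA_cons]; simp only [pvStepB, hh]; simp [ihT]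
    · have hh0 : (pvHeaders.any fun k => PySem.Str.isIn k (PySem.Str.upper (PySem.Str.strip l))) = false := by
        simpa using hh
      by_cases hne : (PySem.Str.strip l != "") = true
      · by_cases hs : (pvStops.any fun k => PySem.Str.startswith (PySem.Str.upper (PySem.Str.strip l)) k) = true
        · constructor <;>
            · rw [pvLoopA_cons]
              simp only [pvStepB, hh0, hne, hs, Bool.and_true]
              simp [ihF]
        · have hs0 : (pvStops.any fun k => PySem.Str.startswith (PySem.Str.upper (PySem.Str.strip l)) k) = false := by
            simpa using hs
          constructor <;>
            · rw [pvLoopA_cons]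
              simp only [pvStepB, hh0, hne, hs0, Bool.and_true,
                         Bool.and_false]
              simp [ihT, ihF]
      · have hne0 : (PySem.Str.strip l != "") = false := by simpa using hne
        constructor <;>
          · rw [pvLoopA_cons]
            simp only [pvStepB, hh0, hne0, Bool.and_false]
            simp [ihT, ihF]

-- ===== VERDICT (by name: the statement is the Claim_ definition above) =====
theorem build_briefing_from_claude_response_spec : Claim_equal_build_briefing_from_claude_response := by
  intro raw _
  unfold Spec_build_briefing_from_claude_response
  unfold build_briefing_from_claude_response build_briefing_from_claude_response_alt
  by_cases h : raw == ""
  · simp [h]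
  · simp only [h]
    rw [(pvLoopA_eq_foldr _ []).2]
    simp
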